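-- pv_equiv track=rewrite | github.com/tnt21101/lead-scraper | providers/apollo_client.py | _pick_best_person
-- ===== SOURCE A (Python) =====
-- from typing import Dict, List, Optional
--
-- def _pick_best_person(people: list, owner_name: Optional[str] = None) -> dict:
--     """Pick the most relevant person from a list of top people."""
--     if not people:
--         return {}
--
--     # If we know the owner name, look for them first
--     if owner_name:
--         name_lower = owner_name.lower()
--         for p in people:
--             if name_lower in (p.get("name") or "").lower():
--                 return p
--
--     # Rank by seniority
--     priority_titles = [
--         "owner", "founder", "co-founder", "ceo", "president",
--         "cto", "cfo", "coo", "chief", "vp", "vice president",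
--         "director", "manager",
--     ]
--     for title_kw in priority_titles:
--         for p in people:
--             person_title = (p.get("title") or "").lower()
--             if title_kw in person_title:
--                 return p
--
--     return people[0]
-- ===== SOURCE B (Python) =====
-- from typing import Optional
--
-- PRIORITY_TITLES = [
--     "owner", "founder", "co-founder", "ceo", "president",
--     "cto", "cfo", "coo", "chief", "vp", "vice president",
--     "director", "manager",
-- ]
--
-- def _pick_best_person(people: list, owner_name: Optional[str] = None) -> dict:
--     """Pick the most relevant person: single people-major pass tracking best seniority rank."""
--     if not people:
--         return {}
--
--     if owner_name:
--         name_lower = owner_name.lower()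
--         for p in people:
--             if name_lower in (p.get("name") or "").lower():
--                 return p
--
--     n = len(PRIORITY_TITLES)
--     best, best_rank = people[0], n
--     for p in people:
--         title = (p.get("title") or "").lower()
--         rank = next((i for i, kw in enumerate(PRIORITY_TITLES) if kw in title), n)
--         if rank < best_rank:
--             best, best_rank = p, rank
--     return best
-- ===== Notes on version B (the rewrite author's own statement) =====
-- stated objective: alternative
-- what changed: Replaced A's title-major nested loops (scan all people once per priority keyword) by a single people-major pass that computes each person's seniority rank (first matching keyword index, or len if none) and keeps the first person with a strictly smaller rank.
import Mathlib
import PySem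

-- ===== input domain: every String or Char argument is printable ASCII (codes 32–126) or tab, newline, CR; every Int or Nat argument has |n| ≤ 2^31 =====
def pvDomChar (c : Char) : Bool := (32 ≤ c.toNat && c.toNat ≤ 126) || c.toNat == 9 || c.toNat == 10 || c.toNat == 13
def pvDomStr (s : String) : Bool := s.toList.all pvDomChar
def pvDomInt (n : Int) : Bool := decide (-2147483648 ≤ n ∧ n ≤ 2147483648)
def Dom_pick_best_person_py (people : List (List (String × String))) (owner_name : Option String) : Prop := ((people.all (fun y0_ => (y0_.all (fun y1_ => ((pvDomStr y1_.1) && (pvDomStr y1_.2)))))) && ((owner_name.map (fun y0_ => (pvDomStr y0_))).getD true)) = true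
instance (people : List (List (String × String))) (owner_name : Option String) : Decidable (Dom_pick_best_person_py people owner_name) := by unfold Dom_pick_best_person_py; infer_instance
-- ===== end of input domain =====

-- B replaces A's title-major nested loops by a single people-major pass that tracks the
-- best seniority rank seen so far (objective: alternative decomposition, same result).

-- shared field access: `p.get(k) or ""` (first-match association-list lookup, missing -> "")
def pvField (p : List (String × String)) (k : String) : String :=
  (PySem.Dict.mk p).getD k ""

def pvPriorityTitles : List String :=
  ["owner", "founder", "co-founder", "ceo", "president",
   "cto", "cfo", "coo", "chief", "vp", "vice president",
   "director", "manager"]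

-- owner-name phase, identical in both Pythons: first person whose lowered name contains the
-- lowered owner_name (none when owner_name is None or "" — Python truthiness)
def pvOwnerHit (people : List (List (String × String))) (owner_name : Option String) :
    Option (List (String × String)) :=
  match owner_name with
  | none => none
  | some nm =>
    if nm == "" then none
    else people.find? (fun p =>
      PySem.Str.isIn (PySem.Str.lower nm) (PySem.Str.lower (pvField p "name")))

-- ===== PORT A =====
-- A's nested loops: for each priority title in order, scan all people for a title containing it
def pvAScan : List String → List (List (String × String)) → Option (List (String × String))
  | [], _ => none
  | kw :: kws, people =>
    match people.find? (fun p => PySem.Str.isIn kw (PySem.Str.lower (pvField p "title"))) with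
    | some p => some p
    | none => pvAScan kws people

def pick_best_person_py (people : List (List (String × String))) (owner_name : Option String) : List (String × String) :=
  match people with
  | [] => []
  | p0 :: _ =>
    match pvOwnerHit people owner_name with
    | some p => p
    | none =>
      match pvAScan pvPriorityTitles people with
      | some p => p
      | none => p0

-- ===== PORT B =====
-- rank of a (lowered) title: index of the first priority keyword it contains, else len
def pvRank (title : String) : Nat :=
  match pvPriorityTitles.findIdx? (fun kw => PySem.Str.isIn kw title) with
  | some i => i
  | none => pvPriorityTitles.length

def pick_best_person_py_alt (people : List (List (String × String))) (owner_name : Option String) : List (String × String) :=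
  match people with
  | [] => []
  | p0 :: _ =>
    match pvOwnerHit people owner_name with
    | some p => p
    | none =>
      (people.foldl
        (fun (s : List (String × String) × Nat) p =>
          let r := pvRank (PySem.Str.lower (pvField p "title"))
          if r < s.2 then (p, r) else s)
        (p0, pvPriorityTitles.length)).1

-- ===== PRECONDITION & SPEC =====
def Spec_pick_best_person_py (people : List (List (String × String))) (owner_name : Option String) (out : List (String × String)) : Prop := out = pick_best_person_py_alt people owner_name
instance (people : List (List (String × String))) (owner_name : Option String) (out : List (String × String)) : Decidable (Spec_pick_best_person_py people owner_name out) := by unfold Spec_pick_best_person_py; infer_instance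

-- ===== CLAIM (what is proved, stated in full; the proofs are below) =====
def Claim_equal_pick_best_person_py : Prop := ∀ (people : List (List (String × String))) (owner_name : Option String), Dom_pick_best_person_py people owner_name → Spec_pick_best_person_py people owner_name (pick_best_person_py people owner_name)

-- ===== LEMMAS AND PROOFS =====

-- rank of person p w.r.t. a keyword suffix kws (rkOf pvPriorityTitles p = B's rank of p)
def rkOf (kws : List String) (p : List (String × String)) : Nat :=
  ((kws.findIdx? (fun kw => PySem.Str.isIn kw (PySem.Str.lower (pvField p "title")))).getD kws.length)

-- minimum rank over people, starting from r
def mK (kws : List String) (people : List (List (String × String))) (r : Nat) : Nat :=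
  people.foldl (fun a p => min a (rkOf kws p)) r

theorem rkOf_cons (kw : String) (kws : List String) (p : List (String × String)) :
    rkOf (kw :: kws) p =
      if PySem.Str.isIn kw (PySem.Str.lower (pvField p "title")) then 0 else rkOf kws p + 1 := by
  simp only [rkOf, List.findIdx?_cons]
  split
  · simp
  · cases h : kws.findIdx? (fun kw => PySem.Str.isIn kw (PySem.Str.lower (pvField p "title"))) <;>
      simp [List.length_cons]

theorem mK_cons (kws : List String) (q : List (String × String))
    (qs : List (List (String × String))) (r : Nat) :
    mK kws (q :: qs) r = mK kws qs (min r (rkOf kws q)) := by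
  simp only [mK, List.foldl_cons]

theorem mK_le_init (kws : List String) (people : List (List (String × String))) (r : Nat) :
    mK kws people r ≤ r := by
  induction people generalizing r with
  | nil => simp [mK]
  | cons p ps ih => exact le_trans (ih (min r (rkOf kws p))) (min_le_left _ _)

theorem mK_le_of_mem (kws : List String) {people : List (List (String × String))}
    {p : List (String × String)} (h : p ∈ people) (r : Nat) :
    mK kws people r ≤ rkOf kws p := by
  induction people generalizing r with
  | nil => cases h
  | cons q qs ih =>
    rw [mK_cons]
    rcases List.mem_cons.mp h with rfl | h'
    · exact le_trans (mK_le_init kws qs _) (min_le_right _ _)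
    · exact ih h' _

theorem mK_attained (kws : List String) (people : List (List (String × String))) (r : Nat) :
    mK kws people r = r ∨ ∃ p ∈ people, rkOf kws p = mK kws people r := by
  induction people generalizing r with
  | nil => exact Or.inl rfl
  | cons q qs ih =>
    rw [mK_cons]
    rcases ih (min r (rkOf kws q)) with h | ⟨p, hp, hr⟩
    · rcases Nat.lt_or_ge (rkOf kws q) r with hlt | hle
      · right; exact ⟨q, List.mem_cons_self, by rw [h]; omega⟩
      · left; rw [h]; omega
    · right; exact ⟨p, List.mem_cons_of_mem _ hp, hr⟩

theorem find?_congr_mem {α : Type} {l : List α} {p q : α → Bool}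
    (h : ∀ x ∈ l, p x = q x) : l.find? p = l.find? q := by
  induction l with
  | nil => rfl
  | cons x xs ih =>
    simp only [List.find?_cons, h x List.mem_cons_self]
    split
    · rfl
    · exact ih (fun y hy => h y (List.mem_cons_of_mem _ hy))

theorem mK_shift (kw : String) (kws : List String) (people : List (List (String × String)))
    (r : Nat) (h : ∀ p ∈ people, ¬ PySem.Str.isIn kw (PySem.Str.lower (pvField p "title"))) :
    mK (kw :: kws) people (r + 1) = mK kws people r + 1 := by
  induction people generalizing r with
  | nil => rfl
  | cons q qs ih =>
    have hq : rkOf (kw :: kws) q = rkOf kws q + 1 := by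
      rw [rkOf_cons, if_neg (by simpa using h q List.mem_cons_self)]
    rw [mK_cons, mK_cons, hq, Nat.succ_min_succ]
    exact ih _ (fun p hp => h p (List.mem_cons_of_mem _ hp))

theorem find?_rk_isSome (kws : List String) (people : List (List (String × String))) (r : Nat)
    (h : mK kws people r < r) :
    (people.find? (fun p => rkOf kws p == mK kws people r)).isSome := by
  rcases mK_attained kws people r with he | ⟨p, hp, hr⟩
  · omega
  · exact List.find?_isSome.mpr ⟨p, hp, by simpa using hr⟩

-- A's nested loops return the first person of minimal rank (when some keyword matches)
theorem pvAScan_eq (kws : List String) (people : List (List (String × String))) :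
    pvAScan kws people =
      if mK kws people kws.length < kws.length then
        people.find? (fun p => rkOf kws p == mK kws people kws.length)
      else none := by
  induction kws with
  | nil =>
    have := mK_le_init [] people 0
    simp only [pvAScan, List.length_nil]
    rw [if_neg (by omega)]
  | cons kw kws ih =>
    show (match people.find? (fun p => PySem.Str.isIn kw (PySem.Str.lower (pvField p "title"))) with
      | some p => some p
      | none => pvAScan kws people) = _
    cases hf : people.find? (fun p => PySem.Str.isIn kw (PySem.Str.lower (pvField p "title"))) with
    | some q =>
      have hqmem : q ∈ people := List.mem_of_find?_eq_some
        (p := fun p => PySem.Str.isIn kw (PySem.Str.lower (pvField p "title"))) hf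
      have hm0 : mK (kw :: kws) people (kw :: kws).length = 0 := by
        have hq0 : rkOf (kw :: kws) q = 0 := by
          rw [rkOf_cons, if_pos (List.find?_some
            (p := fun p => PySem.Str.isIn kw (PySem.Str.lower (pvField p "title"))) hf)]
        have := mK_le_of_mem (kw :: kws) hqmem (kw :: kws).length
        omega
      rw [hm0, if_pos (by simp)]
      rw [find?_congr_mem (l := people)
        (q := fun p => PySem.Str.isIn kw (PySem.Str.lower (pvField p "title"))) ?_, hf]
      intro p hp
      by_cases hc : PySem.Str.isIn kw (PySem.Str.lower (pvField p "title")) = true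
      · rw [rkOf_cons, if_pos hc]; beta_reduce; rw [hc]; rfl
      · rw [rkOf_cons, if_neg hc]; beta_reduce; rw [eq_false_of_ne_true hc]; simp
    | none =>
      have hnone : ∀ p ∈ people, ¬ PySem.Str.isIn kw (PySem.Str.lower (pvField p "title")) := by
        intro p hp
        simpa using List.find?_eq_none.mp hf p hp
      rw [List.length_cons, mK_shift kw kws people kws.length hnone, ih]
      have hcongr : people.find? (fun p => rkOf (kw :: kws) p == mK kws people kws.length + 1)
          = people.find? (fun p => rkOf kws p == mK kws people kws.length) := by
        apply find?_congr_mem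
        intro p hp
        rw [rkOf_cons, if_neg (by simpa using hnone p hp)]
        simp
      rw [hcongr]
      by_cases hlt : mK kws people kws.length < kws.length
      · rw [if_pos hlt, if_pos (by omega)]
      · rw [if_neg hlt, if_neg (by omega)]

-- B's fold computes the same first person of minimal rank
theorem bfold_eq (kws : List String) (people : List (List (String × String)))
    (b : List (String × String)) (r : Nat) :
    people.foldl
        (fun (s : List (String × String) × Nat) p =>
          let rr := rkOf kws p
          if rr < s.2 then (p, rr) else s) (b, r)
      = (if mK kws people r < r then
           (people.find? (fun p => rkOf kws p == mK kws people r)).getD b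
         else b, mK kws people r) := by
  induction people generalizing b r with
  | nil => simp [mK]
  | cons q qs ih =>
    rw [List.foldl_cons, mK_cons, List.find?_cons]
    by_cases hq : rkOf kws q < r
    · rw [show (min r (rkOf kws q)) = rkOf kws q by omega]
      have hm : mK kws qs (rkOf kws q) ≤ rkOf kws q := mK_le_init kws qs _
      simp only [show ((fun (s : List (String × String) × Nat) p =>
          let rr := rkOf kws p
          if rr < s.2 then (p, rr) else s) (b, r) q) = (q, rkOf kws q) by simp [hq]]
      rw [ih q (rkOf kws q)]
      rcases Nat.lt_or_ge (mK kws qs (rkOf kws q)) (rkOf kws q) with hlt | hge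
      · have hne : (rkOf kws q == mK kws qs (rkOf kws q)) = false := by simp; omega
        rw [if_pos hlt, if_pos (by omega), hne]
        obtain ⟨v, hv⟩ := Option.isSome_iff_exists.mp (find?_rk_isSome kws qs (rkOf kws q) hlt)
        rw [hv]; rfl
      · have heq : mK kws qs (rkOf kws q) = rkOf kws q := by omega
        rw [if_neg (by omega), if_pos (by omega)]
        rw [show (rkOf kws q == mK kws qs (rkOf kws q)) = true by simp [heq]]
        rfl
    · rw [show (min r (rkOf kws q)) = r by omega]
      have hm : mK kws qs r ≤ r := mK_le_init kws qs _
      simp only [show ((fun (s : List (String × String) × Nat) p =>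
          let rr := rkOf kws p
          if rr < s.2 then (p, rr) else s) (b, r) q) = (b, r) by simp [hq]]
      rw [ih b r]
      by_cases hqm : rkOf kws q = mK kws qs r
      · rw [show (rkOf kws q == mK kws qs r) = true by simp [hqm]]
        rw [if_neg (show ¬ mK kws qs r < r by omega), if_neg (show ¬ mK kws qs r < r by omega)]
      · rw [show (rkOf kws q == mK kws qs r) = false by simp [hqm]]

theorem pvRank_eq (p : List (String × String)) :
    pvRank (PySem.Str.lower (pvField p "title")) = rkOf pvPriorityTitles p := by
  unfold pvRank rkOf
  cases h : pvPriorityTitles.findIdx?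
      (fun kw => PySem.Str.isIn kw (PySem.Str.lower (pvField p "title")))
  · rfl
  · simp [h]

-- ===== VERDICT (by name: the statement is the Claim_ definition above) =====
theorem pick_best_person_py_spec : Claim_equal_pick_best_person_py := by
  intro people owner_name _
  unfold Spec_pick_best_person_py pick_best_person_py pick_best_person_py_alt
  cases people with
  | nil => rfl
  | cons p0 ps =>
    cases hO : pvOwnerHit (p0 :: ps) owner_name with
    | some p => rfl
    | none =>
      simp only []
      have hstep : (fun (s : List (String × String) × Nat) p =>
            let r := pvRank (PySem.Str.lower (pvField p "title"))
            if r < s.2 then (p, r) else s)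
          = (fun (s : List (String × String) × Nat) p =>
            let rr := rkOf pvPriorityTitles p
            if rr < s.2 then (p, rr) else s) := by
        funext s p; simp only [pvRank_eq]
      rw [hstep, bfold_eq, pvAScan_eq]
      by_cases hlt : mK pvPriorityTitles (p0 :: ps) pvPriorityTitles.length < pvPriorityTitles.length
      · rw [if_pos hlt, if_pos hlt]
        obtain ⟨v, hv⟩ := Option.isSome_iff_exists.mp
          (find?_rk_isSome pvPriorityTitles (p0 :: ps) pvPriorityTitles.length hlt)
        rw [hv]; rfl
      · rw [if_neg hlt, if_neg hlt]
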